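-- pv_equiv track=rewrite | github.com/MakeContributions/DSA | algorithms/Python/strings/is_good_str.py | is_good_str
-- ===== SOURCE A (Python) =====
-- from string import ascii_lowercase
--
-- vowels = "aeiou"
--
-- constants = "".join(c for c in ascii_lowercase if c not in vowels)
--
-- def is_good_str(s: str) -> bool:
--     """
--     >>> is_good_str("aeioup??")
--     True
--     >>> is_good_str("bcdaeiou??")
--     False
--     """
--     s = list(s.lower())
--     for i, char in enumerate(s):
--         if char in constants:
--             s[i] = "c"
--         elif char in vowels:
--             s[i] = "v"
--     s = "".join(s)
--     return not "c" * 4 in s.replace("?", "c") and (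
--         not "v" * 6 in s.replace("?", "v")
--     )
-- ===== SOURCE B (Python) =====
-- def is_good_str(s: str) -> bool:
--     """Single left-to-right scan with two run counters instead of
--     transform-then-substring-search."""
--     cons = vow = 0
--     for ch in s.lower():
--         if ch in "bcdfghjklmnpqrstvwxyz":
--             cons += 1
--             vow = 0
--         elif ch in "aeiou":
--             vow += 1
--             cons = 0
--         elif ch == "?":
--             cons += 1
--             vow += 1
--         else:
--             cons = vow = 0
--         if cons >= 4 or vow >= 6:
--             return False
--     return True
-- ===== Notes on version B (the rewrite author's own statement) =====
-- stated objective: faster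
-- what changed: replaced A's transform-to-cv-string plus two replace/substring searches with a single left-to-right scan keeping two run counters (consonant run, vowel run) and an early exit
import Mathlib
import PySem

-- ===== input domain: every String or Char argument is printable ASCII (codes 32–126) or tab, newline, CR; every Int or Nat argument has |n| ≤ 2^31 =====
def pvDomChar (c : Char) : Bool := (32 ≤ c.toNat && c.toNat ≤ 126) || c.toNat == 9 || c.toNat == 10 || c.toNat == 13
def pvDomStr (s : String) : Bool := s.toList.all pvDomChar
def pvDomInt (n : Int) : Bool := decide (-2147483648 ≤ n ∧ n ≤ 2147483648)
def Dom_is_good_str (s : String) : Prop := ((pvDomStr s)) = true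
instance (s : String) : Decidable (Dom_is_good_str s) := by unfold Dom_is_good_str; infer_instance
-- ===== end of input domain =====

-- B replaces A's transform-then-substring-search with one counter scan; objective: faster (constant factor, early exit).

-- ===== PORT A =====
-- module-level: vowels = "aeiou"
def pyVowels : List Char := ['a', 'e', 'i', 'o', 'u']
-- module-level: constants = "".join(c for c in ascii_lowercase if c not in vowels)
def pyAsciiLowercase : List Char :=
  ['a','b','c','d','e','f','g','h','i','j','k','l','m','n','o','p','q','r','s','t','u','v','w','x','y','z']
def pyConstants : List Char := pyAsciiLowercase.filter (fun c => !(pyVowels.contains c))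

-- the enumerate loop rewrites each position in place; as a list transformation that is a map
def is_good_str (s : String) : Bool :=
  let sl := PySem.Chars.lower s.toList
  let t := sl.map (fun char =>
    if pyConstants.contains char then 'c'
    else if pyVowels.contains char then 'v'
    else char)
  !(PySem.Chars.isIn (PySem.List.pyRepeat ['c'] 4) (PySem.Chars.replace t ['?'] ['c'])) &&
  !(PySem.Chars.isIn (PySem.List.pyRepeat ['v'] 6) (PySem.Chars.replace t ['?'] ['v']))

-- ===== PORT B =====
def bConsonants : List Char :=
  ['b','c','d','f','g','h','j','k','l','m','n','p','q','r','s','t','v','w','x','y','z']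
def bVowels : List Char := ['a', 'e', 'i', 'o', 'u']

-- the for-loop of Source B with its two counters; 'return False' is the false branch
def scanGood : List Char → Nat → Nat → Bool
  | [], _, _ => true
  | ch :: rest, cons, vow =>
    let st :=
      if bConsonants.contains ch then (cons + 1, 0)
      else if bVowels.contains ch then (0, vow + 1)
      else if ch = '?' then (cons + 1, vow + 1)
      else (0, 0)
    if 4 ≤ st.1 || 6 ≤ st.2 then false else scanGood rest st.1 st.2

def is_good_str_alt (s : String) : Bool :=
  scanGood (PySem.Chars.lower s.toList) 0 0

-- ===== PRECONDITION & SPEC =====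
def Spec_is_good_str (s : String) (out : Bool) : Prop := out = is_good_str_alt s
instance (s : String) (out : Bool) : Decidable (Spec_is_good_str s out) := by unfold Spec_is_good_str; infer_instance

-- ===== CLAIM (what is proved, stated in full; the proofs are below) =====
def Claim_equal_is_good_str : Prop := ∀ (s : String), Dom_is_good_str s → Spec_is_good_str s (is_good_str s)

-- ===== LEMMAS AND PROOFS =====

-- run predicates: a char that extends the consonant run / the vowel run
def pcRun (x : Char) : Bool := pyConstants.contains x || x == '?'
def pvRun (x : Char) : Bool := pyVowels.contains x || x == '?'

-- "some k consecutive chars of m all satisfy p"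
def BadRun (p : Char → Bool) (k : Nat) (m : List Char) : Prop :=
  ∃ i, i + k ≤ m.length ∧ ∀ x ∈ (m.drop i).take k, p x = true

-- "a p-run at the very start of l, together with carry r, reaches k"
def CarryRun (p : Char → Bool) (k r : Nat) (l : List Char) : Prop :=
  ∃ n, n ≤ l.length ∧ (∀ x ∈ l.take n, p x = true) ∧ k ≤ r + n

-- single-counter version of the scan
def hitRun (p : Char → Bool) (k : Nat) : Nat → List Char → Bool
  | _, [] => false
  | r, x :: t =>
    let r' := if p x then r + 1 else 0
    (decide (k ≤ r')) || hitRun p k r' t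

lemma replace_go_single (a b : Char) :
    ∀ (l : List Char) (fuel : Nat) (acc : List Char), l.length ≤ fuel →
      PySem.Chars.replace.go [a] [b] fuel l acc =
        acc.reverse ++ l.map (fun x => if x = a then b else x) := by
  intro l
  induction l with
  | nil =>
    intro fuel acc _
    cases fuel <;> simp [PySem.Chars.replace.go]
  | cons c t ih =>
    intro fuel acc h
    cases fuel with
    | zero => simp at h
    | succ f =>
      simp only [PySem.Chars.replace.go]
      by_cases hc : c = a
      · subst hc
        simp only [List.isPrefixOf, beq_self_eq_true, Bool.and_self,
          if_pos, List.length_cons, List.drop_succ_cons, List.reverse_cons,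
          List.reverse_nil, List.nil_append]
        simp only [List.length_nil, List.drop_zero]
        rw [ih f ([b] ++ acc) (by simp at h; omega)]
        simp
      · have : [a].isPrefixOf (c :: t) = false := by
          simp [List.isPrefixOf]; exact fun h' => absurd h'.symm hc
        rw [this]
        simp only [Bool.false_eq_true, if_neg, not_false_iff]
        rw [ih f (c :: acc) (by simp at h; omega)]
        simp [hc]

lemma replace_single (m : List Char) (a b : Char) :
    PySem.Chars.replace m [a] [b] = m.map (fun x => if x = a then b else x) := by
  rw [PySem.Chars.replace]
  simp only [List.isEmpty_cons, if_neg, Bool.false_eq_true, not_false_iff]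
  simpa using replace_go_single a b m m.length [] (le_refl _)

lemma isIn_replicate_iff (k : Nat) (a : Char) (m : List Char) :
    PySem.Chars.isIn (List.replicate k a) m = true ↔ BadRun (fun x => x == a) k m := by
  rw [PySem.Chars.isIn_iff_infix]
  constructor
  · intro h
    obtain ⟨s, t, rfl⟩ := h
    refine ⟨s.length, by simp, ?_⟩
    intro x hx
    have : (List.drop s.length (s ++ List.replicate k a ++ t)).take k = List.replicate k a := by
      rw [List.append_assoc, List.drop_left, List.take_left' (List.length_replicate)]
    rw [this] at hx
    simpa using List.eq_of_mem_replicate hx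
  · rintro ⟨i, hik, hall⟩
    have hlen : ((m.drop i).take k).length = k := by
      simp [List.length_take, List.length_drop]
      omega
    have heq : (m.drop i).take k = List.replicate k a := by
      rw [List.eq_replicate_iff]
      exact ⟨hlen, fun x hx => by simpa using hall x hx⟩
    rw [← heq]
    exact ((List.take_prefix _ _).isInfix.trans (List.drop_suffix i m).isInfix)

lemma badRun_map (g : Char → Char) (p : Char → Bool) (k : Nat) (l : List Char) :
    BadRun p k (l.map g) ↔ BadRun (fun x => p (g x)) k l := by
  unfold BadRun
  constructor
  · rintro ⟨i, hik, hall⟩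
    refine ⟨i, by simpa using hik, fun x hx => ?_⟩
    exact hall (g x) (by rw [← List.map_drop, ← List.map_take]; exact List.mem_map_of_mem hx)
  · rintro ⟨i, hik, hall⟩
    refine ⟨i, by simpa using hik, fun x hx => ?_⟩
    rw [← List.map_drop, ← List.map_take] at hx
    obtain ⟨y, hy, rfl⟩ := List.mem_map.mp hx
    exact hall y hy

lemma pyConstants_eq : pyConstants = bConsonants := by decide

lemma pcRun_cons (x : Char) (h : bConsonants.contains x = true) : pcRun x = true := by
  have h' : x ∈ bConsonants := by simpa using h
  fin_cases h' <;> decide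

lemma pvRun_cons (x : Char) (h : bConsonants.contains x = true) : pvRun x = false := by
  have h' : x ∈ bConsonants := by simpa using h
  fin_cases h' <;> decide

lemma pcRun_vow (x : Char) (h : bVowels.contains x = true) : pcRun x = false := by
  have h' : x ∈ bVowels := by simpa using h
  fin_cases h' <;> decide

lemma pvRun_vow (x : Char) (h : bVowels.contains x = true) : pvRun x = true := by
  have h' : x ∈ bVowels := by simpa using h
  fin_cases h' <;> decide

lemma run_other (x : Char) (h1 : bConsonants.contains x = false) (h2 : bVowels.contains x = false)
    (h3 : x ≠ '?') : pcRun x = false ∧ pvRun x = false := by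
  have e1 : pyConstants.contains x = false := by rw [pyConstants_eq]; exact h1
  have e3 : (x == '?') = false := by simpa using h3
  refine ⟨?_, ?_⟩
  · show (pyConstants.contains x || x == '?') = false
    rw [e1, e3]; rfl
  · show (pyVowels.contains x || x == '?') = false
    rw [show pyVowels = bVowels from rfl, h2, e3]; rfl

lemma scan_split (l : List Char) :
    ∀ (r w : Nat), scanGood l r w = (!(hitRun pcRun 4 r l) && !(hitRun pvRun 6 w l)) := by
  induction l with
  | nil => intro r w; simp [scanGood, hitRun]
  | cons x t ih =>
    intro r w
    by_cases hc : bConsonants.contains x = true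
    · have hcm : x ∈ bConsonants := by simpa using hc
      by_cases h4 : 4 ≤ r + 1
      · simp [scanGood, hitRun, hcm, pcRun_cons x hc, pvRun_cons x hc, h4]
      · simp [scanGood, hitRun, hcm, pcRun_cons x hc, pvRun_cons x hc, h4, ih]
    · have hcm : x ∉ bConsonants := by simpa using hc
      by_cases hv : bVowels.contains x = true
      · have hvm : x ∈ bVowels := by simpa using hv
        by_cases h6 : 6 ≤ w + 1
        · simp [scanGood, hitRun, hcm, hvm, pcRun_vow x hv, pvRun_vow x hv, h6]
        · simp [scanGood, hitRun, hcm, hvm, pcRun_vow x hv, pvRun_vow x hv, h6, ih]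
      · have hvm : x ∉ bVowels := by simpa using hv
        by_cases hq : x = '?'
        · subst hq
          by_cases h4 : 4 ≤ r + 1
          · simp [scanGood, hitRun, hcm, hvm, h4,
              (by decide : pcRun '?' = true), (by decide : pvRun '?' = true)]
          · by_cases h6 : 6 ≤ w + 1
            · simp [scanGood, hitRun, hcm, hvm, h4, h6,
                (by decide : pcRun '?' = true), (by decide : pvRun '?' = true)]
            · simp [scanGood, hitRun, hcm, hvm, h4, h6,
                (by decide : pcRun '?' = true), (by decide : pvRun '?' = true), ih]
        · obtain ⟨hp, hp'⟩ := run_other x (by simpa using hc) (by simpa using hv) hq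
          simp [scanGood, hitRun, hcm, hvm, hq, hp, hp', ih]

lemma hit_iff (p : Char → Bool) (k : Nat) :
    ∀ (l : List Char) (r : Nat), r < k →
      (hitRun p k r l = true ↔ CarryRun p k r l ∨ BadRun p k l) := by
  intro l
  induction l with
  | nil =>
    intro r hr
    simp only [hitRun, Bool.false_eq_true, false_iff]
    rintro (⟨n, hn, _, hkn⟩ | ⟨i, hik, _⟩)
    · simp only [List.length_nil, Nat.le_zero] at hn; omega
    · simp only [List.length_nil] at hik; omega
  | cons x t ih =>
    intro r hr
    by_cases hp : p x = true
    · by_cases hk : k ≤ r + 1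
      · have hh : hitRun p k r (x :: t) = true := by simp [hitRun, hp, hk]
        rw [hh]
        simp only [true_iff]
        left
        refine ⟨1, by simp, ?_, by omega⟩
        intro y hy
        simp only [List.take_succ_cons, List.take_zero, List.mem_singleton] at hy
        subst hy; exact hp
      · have hh : hitRun p k r (x :: t) = hitRun p k (r + 1) t := by simp [hitRun, hp, hk]
        rw [hh, ih (r + 1) (by omega)]
        constructor
        · rintro (⟨n, hn, hall, hkn⟩ | ⟨i, hik, hall⟩)
          · left
            refine ⟨n + 1, by simp; omega, ?_, by omega⟩
            intro y hy
            simp only [List.take_succ_cons] at hy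
            rcases List.mem_cons.mp hy with rfl | hy'
            · exact hp
            · exact hall y hy'
          · right
            refine ⟨i + 1, by simp; omega, ?_⟩
            intro y hy
            exact hall y (by simpa only [List.drop_succ_cons] using hy)
        · rintro (⟨n, hn, hall, hkn⟩ | ⟨i, hik, hall⟩)
          · cases n with
            | zero => omega
            | succ m =>
              left
              refine ⟨m, by simp at hn; omega, ?_, by omega⟩
              intro y hy
              exact hall y (by simp only [List.take_succ_cons]; exact List.mem_cons_of_mem _ hy)
          · cases i with
            | zero =>
              left
              refine ⟨k - 1, by simp at hik; omega, ?_, by omega⟩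
              intro y hy
              apply hall y
              simp only [List.drop_zero]
              have hk1 : k = (k - 1) + 1 := by omega
              rw [hk1, List.take_succ_cons]
              exact List.mem_cons_of_mem _ hy
            | succ j =>
              right
              refine ⟨j, by simp at hik; omega, ?_⟩
              intro y hy
              exact hall y (by simpa only [List.drop_succ_cons] using hy)
    · have hp' : p x = false := by simpa using hp
      have hk0 : ¬ (k ≤ 0) := by omega
      have hh : hitRun p k r (x :: t) = hitRun p k 0 t := by simp [hitRun, hp', hk0]
      rw [hh, ih 0 (by omega)]
      constructor
      · rintro (⟨n, hn, hall, hkn⟩ | ⟨i, hik, hall⟩)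
        · right
          refine ⟨1, by simp; omega, ?_⟩
          intro y hy
          simp only [List.drop_succ_cons, List.drop_zero] at hy
          apply hall y
          have ht : t.take k = (t.take n).take k := by
            rw [List.take_take, Nat.min_eq_left (by omega)]
          rw [ht] at hy
          exact List.mem_of_mem_take hy
        · right
          refine ⟨i + 1, by simp; omega, ?_⟩
          intro y hy
          exact hall y (by simpa only [List.drop_succ_cons] using hy)
      · rintro (⟨n, hn, hall, hkn⟩ | ⟨i, hik, hall⟩)
        · cases n with
          | zero => omega
          | succ m =>
            exfalso
            have hx := hall x (by simp [List.take_succ_cons])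
            rw [hp'] at hx; exact Bool.false_ne_true hx
        · cases i with
          | zero =>
            exfalso
            have hx := hall x (by
              simp only [List.drop_zero]
              have hk1 : k = (k - 1) + 1 := by omega
              rw [hk1, List.take_succ_cons]
              exact List.mem_cons.mpr (Or.inl rfl))
            rw [hp'] at hx; exact Bool.false_ne_true hx
          | succ j =>
            right
            refine ⟨j, by simp at hik; omega, ?_⟩
            intro y hy
            exact hall y (by simpa only [List.drop_succ_cons] using hy)

lemma carry_zero_to_bad (p : Char → Bool) (k : Nat) (l : List Char)
    (h : CarryRun p k 0 l) : BadRun p k l := by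
  obtain ⟨n, hn, hall, hkn⟩ := h
  refine ⟨0, by omega, ?_⟩
  intro y hy
  simp only [List.drop_zero] at hy
  apply hall y
  have ht : l.take k = (l.take n).take k := by
    rw [List.take_take, Nat.min_eq_left (by omega)]
  rw [ht] at hy
  exact List.mem_of_mem_take hy

lemma side_eq (l : List Char) (g : Char → Char) (a : Char) (p : Char → Bool) (k : Nat)
    (hk : 0 < k)
    (hg : (fun x => ((if g x = '?' then a else g x) == a)) = p) :
    PySem.Chars.isIn (List.replicate k a) (PySem.Chars.replace (l.map g) ['?'] [a])
      = hitRun p k 0 l := by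
  rw [replace_single, List.map_map, Bool.eq_iff_iff, isIn_replicate_iff, badRun_map]
  simp only [Function.comp]
  rw [hg, hit_iff p k l 0 hk]
  constructor
  · exact fun hb => Or.inr hb
  · rintro (hcar | hb)
    · exact carry_zero_to_bad p k l hcar
    · exact hb

lemma hg_cons :
    (fun x => ((if (fun char => if pyConstants.contains char then 'c'
        else if pyVowels.contains char then 'v' else char) x = '?' then 'c'
        else (fun char => if pyConstants.contains char then 'c'
        else if pyVowels.contains char then 'v' else char) x) == 'c')) = pcRun := by
  funext x
  by_cases hc : pyConstants.contains x = true
  · have hcm : x ∈ pyConstants := by simpa using hc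
    simp [pcRun, hcm]
  · by_cases hv : pyVowels.contains x = true
    · have hxm : x ∈ pyVowels := by simpa using hv
      fin_cases hxm <;> decide
    · by_cases hq : x = '?'
      · subst hq; decide
      · have hx : (x == 'c') = false := by
          simp only [beq_eq_false_iff_ne, ne_eq]
          intro h; subst h; exact hc (by decide)
        have hcm : x ∉ pyConstants := by simpa using hc
        have hvm : x ∉ pyVowels := by simpa using hv
        simp [pcRun, hcm, hvm, hq, hx]

lemma hg_vow :
    (fun x => ((if (fun char => if pyConstants.contains char then 'c'
        else if pyVowels.contains char then 'v' else char) x = '?' then 'v'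
        else (fun char => if pyConstants.contains char then 'c'
        else if pyVowels.contains char then 'v' else char) x) == 'v')) = pvRun := by
  funext x
  by_cases hc : pyConstants.contains x = true
  · have hxm : x ∈ pyConstants := by simpa using hc
    fin_cases hxm <;> decide
  · by_cases hv : pyVowels.contains x = true
    · have hcm : x ∉ pyConstants := by simpa using hc
      have hvm : x ∈ pyVowels := by simpa using hv
      simp [pvRun, hcm, hvm]
    · by_cases hq : x = '?'
      · subst hq; decide
      · have hx : (x == 'v') = false := by
          simp only [beq_eq_false_iff_ne, ne_eq]
          intro h; subst h; exact hc (by decide)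
        have hcm : x ∉ pyConstants := by simpa using hc
        have hvm : x ∉ pyVowels := by simpa using hv
        simp [pvRun, hcm, hvm, hq, hx]

-- ===== VERDICT (by name: the statement is the Claim_ definition above) =====
theorem is_good_str_spec : Claim_equal_is_good_str := by
  intro s _
  show is_good_str s = is_good_str_alt s
  unfold is_good_str is_good_str_alt
  rw [scan_split]
  simp only [show PySem.List.pyRepeat ['c'] 4 = List.replicate 4 'c' from by decide,
    show PySem.List.pyRepeat ['v'] 6 = List.replicate 6 'v' from by decide,
    side_eq _ _ 'c' pcRun 4 (by omega) hg_cons,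
    side_eq _ _ 'v' pvRun 6 (by omega) hg_vow]
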